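-- pv_equiv track=rewrite | github.com/csgear/competitive | usaco/chapter1/wormhole.py | solve
-- ===== SOURCE A (Python) =====
-- def next_on_right(x, y, wormholes):
--     """
--     Find the next wormhole directly to the right of position (x,y).
--     Returns None if there is no wormhole to the right.
--     """
--     next_hole = None
--     next_x = float('inf')
--
--     for wx, wy in wormholes:
--         if wy == y and wx > x and wx < next_x:
--             next_hole = (wx, wy)
--             next_x = wx
--
--     return next_hole
--
-- def has_cycle(wormholes, pairs):
--     """
--     Check if the given wormhole pairing creates any cycles.
--     """
--     for start_x, start_y in wormholes:
--         pos = (start_x, start_y)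
--         visited = set()
--
--         while True:
--             next_hole = next_on_right(pos[0], pos[1], wormholes)
--             if next_hole is None:
--                 break
--             if next_hole in visited:
--                 return True
--             visited.add(next_hole)
--             pos = pairs[next_hole]
--
--     return False
--
-- def solve(wormholes):
--     """
--     Generate all possible pairings and count those that create cycles.
--     Returns the total number of possible pairings that create cycles.
--     """
--     def generate_pairings(unpaired, pairs):
--         # Base case: all wormholes are paired
--         if not unpaired:
--             if has_cycle(wormholes, pairs):
--                 return 1
--             return 0
--
--         total = 0
--         first = unpaired[0]  # Take first unpaired wormhole
--
--         # Try pairing it with each remaining unpaired wormhole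
--         for i in range(1, len(unpaired)):
--             second = unpaired[i]
--
--             # Create new pairing
--             new_pairs = pairs.copy()
--             new_pairs[first] = second
--             new_pairs[second] = first
--
--             # Remove both wormholes from unpaired list
--             new_unpaired = unpaired[1:i] + unpaired[i+1:]
--
--             # Recursively generate remaining pairings
--             total += generate_pairings(new_unpaired, new_pairs)
--
--         return total
--
--     return generate_pairings(list(wormholes), {})
-- ===== SOURCE B (Python) =====
-- def solve(wormholes):
--     ws = list(wormholes)
--     n = len(ws)
--
--     # next-on-right successor of each hole, computed ONCE (it does not depend on the pairing):
--     # the minimum x strictly to the right on the same row, or None.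
--     nxt = {}
--     for (x, y) in ws:
--         xs = [wx for (wx, wy) in ws if wy == y and wx > x]
--         nxt[(x, y)] = (min(xs), y) if xs else None
--
--     def cyclic(pairs):
--         # A walk of n+1 hops in a functional graph on at most n nodes must be in a cycle,
--         # so no visited-set is needed: just count hops.
--         for start in ws:
--             pos = start
--             alive = True
--             for _ in range(n + 1):
--                 nh = nxt[pos]
--                 if nh is None:
--                     alive = False
--                     break
--                 pos = pairs[nh]
--             if alive:
--                 return True
--         return False
--
--     def count(unpaired, pairs):
--         if not unpaired:
--             return 1 if cyclic(pairs) else 0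
--         first, rest = unpaired[0], unpaired[1:]
--         total = 0
--         for i, second in enumerate(rest):
--             new_pairs = dict(pairs)
--             new_pairs[first] = second
--             new_pairs[second] = first
--             total += count(rest[:i] + rest[i + 1:], new_pairs)
--         return total
--
--     return count(ws, {})
-- ===== Notes on version B (the rewrite author's own statement) =====
-- stated objective: alternative
-- what changed: The next-on-right successor of every hole is computed once as a table before the enumeration (A rescans all wormholes on every hop of every walk of every pairing), and the per-pairing cycle test replaces A's visited-set walks by fixed-length walks: a walk that survives n+1 hops in a functional graph on n nodes must be in a cycle, so B just counts hops.
import Mathlib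
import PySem

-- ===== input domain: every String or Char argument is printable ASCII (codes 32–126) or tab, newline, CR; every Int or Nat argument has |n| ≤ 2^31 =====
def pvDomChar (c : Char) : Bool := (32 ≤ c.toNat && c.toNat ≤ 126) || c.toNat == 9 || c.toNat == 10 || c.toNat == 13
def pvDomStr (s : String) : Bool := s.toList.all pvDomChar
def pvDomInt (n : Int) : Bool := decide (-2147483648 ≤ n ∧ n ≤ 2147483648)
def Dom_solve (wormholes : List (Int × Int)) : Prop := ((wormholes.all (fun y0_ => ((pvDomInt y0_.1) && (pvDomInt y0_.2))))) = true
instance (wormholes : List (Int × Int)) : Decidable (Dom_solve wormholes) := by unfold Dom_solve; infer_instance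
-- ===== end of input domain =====

-- B hoists the next-on-right successor table out of the pairing enumeration (A rescans all
-- wormholes on every hop) and replaces A's visited-set walks by fixed-length (n+1)-hop walks
-- (a cheaper per-pairing cycle test; objective: alternative).

-- ===== PORT A =====

-- 'wx < next_x' where next_x starts at float('inf'); none models +infinity
def ltInf (a : Int) (nx : Option Int) : Bool :=
  match nx with
  | none => true
  | some v => decide (a < v)

def nextOnRight (x y : Int) (ws : List (Int × Int)) : Option (Int × Int) :=
  (ws.foldl
    (fun st wp =>
      if wp.2 = y ∧ x < wp.1 ∧ ltInf wp.1 st.2 = true then (some wp, some wp.1) else st)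
    ((none : Option (Int × Int)), (none : Option Int))).1

-- pairs[k]; KeyError is unreachable from solve / solve_alt (at every completed pairing every
-- wormhole is a key), so the default is never returned
def pairsGet (pairs : PySem.Dict (Int × Int) (Int × Int)) (k : Int × Int) : Int × Int :=
  pairs.getD k k

-- the 'while True' walk of has_cycle; fuel ws.length + 2 is exhausted by no run (the loop ends
-- within one hop per distinct wormhole plus one, proved in the lemmas below)
def hcWalk (ws : List (Int × Int)) (pairs : PySem.Dict (Int × Int) (Int × Int)) :
    Int × Int → PySem.Set (Int × Int) → Nat → Bool
  | _, _, 0 => false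
  | pos, visited, f+1 =>
    match nextOnRight pos.1 pos.2 ws with
    | none => false
    | some nh =>
      if nh ∈ visited then true
      else hcWalk ws pairs (pairsGet pairs nh) (PySem.Set.add visited nh) f

def hasCycle (ws : List (Int × Int)) (pairs : PySem.Dict (Int × Int) (Int × Int)) : Bool :=
  ws.any fun s => hcWalk ws pairs s PySem.Set.empty (ws.length + 2)

-- generate_pairings; fuel unpaired.length + 1 is exhausted by no run (each call removes two)
def genPairingsA (ws : List (Int × Int)) :
    Nat → List (Int × Int) → PySem.Dict (Int × Int) (Int × Int) → Int
  | 0, _, _ => 0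
  | f+1, unpaired, pairs =>
    if unpaired = [] then (if hasCycle ws pairs then 1 else 0)
    else
      let first := PySem.List.pyGetD unpaired 0 (0, 0)   -- unpaired[0]; in range: unpaired ≠ []
      (PySem.List.pyRange 1 (PySem.List.len unpaired) 1).foldl
        (fun total i =>
          let second := PySem.List.pyGetD unpaired i (0, 0)   -- unpaired[i]; in range
          let newPairs := (pairs.insert first second).insert second first
          let newUnpaired := PySem.List.slice unpaired (some 1) (some i) ++
            PySem.List.slice unpaired (some (i + 1)) none
          total + genPairingsA ws f newUnpaired newPairs)
        0

def solve (wormholes : List (Int × Int)) : Int :=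
  genPairingsA wormholes (wormholes.length + 1) wormholes PySem.Dict.empty

-- ===== PORT B =====

-- (min(xs), y) if xs else None, with xs the x's strictly right of p on its row
def rowMinRight (p : Int × Int) (ws : List (Int × Int)) : Option (Int × Int) :=
  let xs := (ws.filter fun w => decide (w.2 = p.2 ∧ p.1 < w.1)).map (·.1)
  match PySem.List.min? xs id with
  | none => none
  | some m => some (m, p.2)

def buildNxt (ws : List (Int × Int)) : PySem.Dict (Int × Int) (Option (Int × Int)) :=
  ws.foldl (fun d p => d.insert p (rowMinRight p ws)) PySem.Dict.empty

-- nxt[pos]; KeyError is unreachable from solve_alt (every reachable pos is a wormhole, all keyed)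
def nxtGet (nxt : PySem.Dict (Int × Int) (Option (Int × Int))) (pos : Int × Int) :
    Option (Int × Int) :=
  (nxt.get? pos).getD none

-- the 'for _ in range(n+1)' walk: true = survived all hops (alive)
def bWalk (nxt : PySem.Dict (Int × Int) (Option (Int × Int)))
    (pairs : PySem.Dict (Int × Int) (Int × Int)) : Int × Int → Nat → Bool
  | _, 0 => true
  | pos, k+1 =>
    match nxtGet nxt pos with
    | none => false
    | some nh => bWalk nxt pairs (pairsGet pairs nh) k

def cyclicB (ws : List (Int × Int)) (nxt : PySem.Dict (Int × Int) (Option (Int × Int)))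
    (pairs : PySem.Dict (Int × Int) (Int × Int)) : Bool :=
  ws.any fun s => bWalk nxt pairs s (ws.length + 1)

-- count; same fuel convention as A's port ('zipIdx' pairs each element with its index, as enumerate)
def genPairingsB (ws : List (Int × Int)) (nxt : PySem.Dict (Int × Int) (Option (Int × Int))) :
    Nat → List (Int × Int) → PySem.Dict (Int × Int) (Int × Int) → Int
  | 0, _, _ => 0
  | f+1, unpaired, pairs =>
    match unpaired with
    | [] => if cyclicB ws nxt pairs then 1 else 0
    | first :: rest =>
      rest.zipIdx.foldl
        (fun total si =>
          let newPairs := (pairs.insert first si.1).insert si.1 first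
          let newUnpaired := PySem.List.slice rest none (some (si.2 : Int)) ++
            PySem.List.slice rest (some ((si.2 : Int) + 1)) none
          total + genPairingsB ws nxt f newUnpaired newPairs)
        0

def solve_alt (wormholes : List (Int × Int)) : Int :=
  genPairingsB wormholes (buildNxt wormholes) (wormholes.length + 1) wormholes PySem.Dict.empty

-- ===== PRECONDITION & SPEC =====
def Spec_solve (wormholes : List (Int × Int)) (out : Int) : Prop := out = solve_alt wormholes
instance (wormholes : List (Int × Int)) (out : Int) : Decidable (Spec_solve wormholes out) := by
  unfold Spec_solve; infer_instance

-- ===== CLAIM (what is proved, stated in full; the proofs are below) =====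
def Claim_equal_solve : Prop :=
  ∀ (wormholes : List (Int × Int)), Dom_solve wormholes → Spec_solve wormholes (solve wormholes)

-- ===== LEMMAS AND PROOFS =====

-- every value stored in pairs is a wormhole (invariant of the enumeration)
def PairsInWs (ws : List (Int × Int)) (pairs : PySem.Dict (Int × Int) (Int × Int)) : Prop :=
  ∀ k v, pairs.get? k = some v → v ∈ ws

-- proof-side reference walk: B's hop-count walk with next_on_right recomputed (no table)
def survives (ws : List (Int × Int)) (pairs : PySem.Dict (Int × Int) (Int × Int)) :
    Int × Int → Nat → Bool
  | _, 0 => true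
  | pos, k+1 =>
    match nextOnRight pos.1 pos.2 ws with
    | none => false
    | some nh => survives ws pairs (pairsGet pairs nh) k

-- proof-side: position after k hops (none = the walk fell off)
def iterPos (ws : List (Int × Int)) (pairs : PySem.Dict (Int × Int) (Int × Int)) :
    Int × Int → Nat → Option (Int × Int)
  | pos, 0 => some pos
  | pos, k+1 =>
    match nextOnRight pos.1 pos.2 ws with
    | none => none
    | some nh => iterPos ws pairs (pairsGet pairs nh) k

theorem nextOnRight_mem {x y : Int} {ws : List (Int × Int)} {nh : Int × Int}
    (h : nextOnRight x y ws = some nh) : nh ∈ ws := by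
  unfold nextOnRight at h
  have aux : ∀ (l : List (Int × Int)) (st : Option (Int × Int) × Option Int),
      (l.foldl
        (fun st wp =>
          if wp.2 = y ∧ x < wp.1 ∧ ltInf wp.1 st.2 = true then (some wp, some wp.1) else st)
        st).1 = some nh → nh ∈ l ∨ st.1 = some nh := by
    intro l
    induction l with
    | nil => intro st h; exact Or.inr h
    | cons wp tl ih =>
      intro st h
      simp only [List.foldl_cons] at h
      rcases ih _ h with h1 | h1
      · exact Or.inl (List.mem_cons_of_mem _ h1)
      · by_cases hc : wp.2 = y ∧ x < wp.1 ∧ ltInf wp.1 st.2 = true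
        · rw [if_pos hc] at h1
          simp only [Option.some.injEq] at h1
          subst h1
          exact Or.inl List.mem_cons_self
        · rw [if_neg hc] at h1
          exact Or.inr h1
  rcases aux ws _ h with h1 | h1
  · exact h1
  · simp at h1

-- the body of PySem.List.min? with key = id, as a named step function
def minStep (acc : Option Int) (v : Int) : Option Int :=
  match acc with
  | none => some v
  | some m => if v < m then some v else some m

theorem min?_id_eq_foldl (xs : List Int) : PySem.List.min? xs id = xs.foldl minStep none := by
  unfold PySem.List.min?
  apply PySem.List.foldl_congr_mem
  intro acc x _
  cases acc <;> rfl

theorem norAux (x y : Int) : ∀ (l : List (Int × Int)) (m : Option Int),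
    (l.foldl
      (fun st wp =>
        if wp.2 = y ∧ x < wp.1 ∧ ltInf wp.1 st.2 = true then (some wp, some wp.1) else st)
      (m.map (fun v => (v, y)), m)).1
    = (((l.filter fun w => decide (w.2 = y ∧ x < w.1)).map (·.1)).foldl minStep m).map
        (fun v => (v, y)) := by
  intro l
  induction l with
  | nil => intro m; rfl
  | cons wp tl ih =>
    intro m
    obtain ⟨wx, wy⟩ := wp
    simp only [List.foldl_cons, List.filter_cons]
    by_cases h1 : wy = y
    · subst h1
      by_cases h2 : x < wx
      · cases m with
        | none =>
          rw [if_pos ⟨rfl, h2, rfl⟩, if_pos (by simp [h2])]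
          simp only [List.map_cons, List.foldl_cons]
          exact ih (some wx)
        | some mv =>
          by_cases h3 : wx < mv
          · rw [if_pos ⟨rfl, h2, by simp [ltInf, h3]⟩, if_pos (by simp [h2])]
            simp only [List.map_cons, List.foldl_cons]
            have hm : minStep (some mv) wx = some wx := by simp [minStep, h3]
            rw [hm]
            exact ih (some wx)
          · rw [if_neg (fun hcon => h3 (by simpa [ltInf] using hcon.2.2)),
              if_pos (by simp [h2])]
            simp only [List.map_cons, List.foldl_cons]
            have hm : minStep (some mv) wx = some mv := by simp [minStep, h3]
            rw [hm]
            exact ih (some mv)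
      · rw [if_neg (fun hcon => h2 hcon.2.1), if_neg (by simp [h2])]
        exact ih m
    · rw [if_neg (fun hcon => h1 hcon.1), if_neg (by simp [h1])]
      exact ih m

theorem rowMinRight_eq (p : Int × Int) (ws : List (Int × Int)) :
    rowMinRight p ws = nextOnRight p.1 p.2 ws := by
  simp only [rowMinRight, nextOnRight]
  have h := norAux p.1 p.2 ws none
  simp only [Option.map_none] at h
  rw [h, min?_id_eq_foldl]
  cases hm : ((ws.filter fun w => decide (w.2 = p.2 ∧ p.1 < w.1)).map (·.1)).foldl minStep none with
  | none => rfl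
  | some v => rfl

theorem buildNxt_get? (ws : List (Int × Int)) (q : Int × Int) :
    (buildNxt ws).get? q = if q ∈ ws then some (rowMinRight q ws) else none := by
  unfold buildNxt
  have aux : ∀ (l : List (Int × Int)) (d : PySem.Dict (Int × Int) (Option (Int × Int))),
      (l.foldl (fun d p => d.insert p (rowMinRight p ws)) d).get? q
        = if q ∈ l then some (rowMinRight q ws) else d.get? q := by
    intro l
    induction l with
    | nil => intro d; simp
    | cons p tl ih =>
      intro d
      simp only [List.foldl_cons]
      rw [ih]
      by_cases hq : q ∈ tl
      · simp [hq]
      · rw [if_neg hq, PySem.Dict.get?_insert]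
        by_cases hqp : q = p
        · subst hqp; simp
        · simp [hqp, hq]
  rw [aux]
  simp [PySem.Dict.get?_empty]

theorem nxtGet_buildNxt {ws : List (Int × Int)} {p : Int × Int} (hp : p ∈ ws) :
    nxtGet (buildNxt ws) p = nextOnRight p.1 p.2 ws := by
  unfold nxtGet
  rw [buildNxt_get?, if_pos hp]
  simp [rowMinRight_eq]

theorem pairsGet_mem {ws : List (Int × Int)} {pairs : PySem.Dict (Int × Int) (Int × Int)}
    (hP : PairsInWs ws pairs) {k : Int × Int} (hk : k ∈ ws) : pairsGet pairs k ∈ ws := by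
  unfold pairsGet
  rw [PySem.Dict.getD_eq_get?_getD]
  cases h : pairs.get? k with
  | none => simpa using hk
  | some v => simpa using hP _ _ h

theorem bWalk_eq_survives {ws : List (Int × Int)} {pairs : PySem.Dict (Int × Int) (Int × Int)}
    (hP : PairsInWs ws pairs) :
    ∀ (k : Nat) (pos : Int × Int), pos ∈ ws →
      bWalk (buildNxt ws) pairs pos k = survives ws pairs pos k := by
  intro k
  induction k with
  | zero => intro pos _; rfl
  | succ k ih =>
    intro pos hp
    have hx := nxtGet_buildNxt hp
    cases h : nextOnRight pos.1 pos.2 ws with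
    | none => simp only [bWalk, survives, hx, h]
    | some nh =>
      simp only [bWalk, survives, hx, h]
      exact ih _ (pairsGet_mem hP (nextOnRight_mem h))

theorem survives_mono {ws : List (Int × Int)} {pairs : PySem.Dict (Int × Int) (Int × Int)} :
    ∀ (m n : Nat) (pos : Int × Int), survives ws pairs pos (m + n) = true →
      survives ws pairs pos m = true := by
  intro m
  induction m with
  | zero => intro n pos _; rfl
  | succ m ih =>
    intro n pos h
    rw [show m + 1 + n = m + n + 1 by omega] at h
    cases hno : nextOnRight pos.1 pos.2 ws with
    | none => simp only [survives, hno] at h; exact Bool.noConfusion h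
    | some nh =>
      simp only [survives, hno] at h ⊢
      exact ih n _ h

theorem iterPos_add {ws : List (Int × Int)} {pairs : PySem.Dict (Int × Int) (Int × Int)} :
    ∀ (m n : Nat) (pos : Int × Int),
      iterPos ws pairs pos (m + n)
        = (iterPos ws pairs pos m).bind (fun q => iterPos ws pairs q n) := by
  intro m
  induction m with
  | zero => intro n pos; simp [iterPos]
  | succ m ih =>
    intro n pos
    rw [show m + 1 + n = m + n + 1 by omega]
    cases hno : nextOnRight pos.1 pos.2 ws with
    | none => simp only [iterPos, hno]; rfl
    | some nh =>
      simp only [iterPos, hno]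
      exact ih n _

theorem iterPos_imp_survives {ws : List (Int × Int)} {pairs : PySem.Dict (Int × Int) (Int × Int)} :
    ∀ (m : Nat) (pos q : Int × Int), iterPos ws pairs pos m = some q →
      survives ws pairs pos m = true := by
  intro m
  induction m with
  | zero => intro pos q _; rfl
  | succ m ih =>
    intro pos q h
    cases hno : nextOnRight pos.1 pos.2 ws with
    | none => simp only [iterPos, hno] at h; simp at h
    | some nh =>
      simp only [iterPos, hno] at h
      simp only [survives, hno]
      exact ih _ _ h

theorem survives_shift {ws : List (Int × Int)} {pairs : PySem.Dict (Int × Int) (Int × Int)} :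
    ∀ (m n : Nat) (pos q : Int × Int), iterPos ws pairs pos m = some q →
      survives ws pairs pos (m + n) = survives ws pairs q n := by
  intro m
  induction m with
  | zero =>
    intro n pos q h
    simp only [iterPos, Option.some.injEq] at h
    subst h
    simp
  | succ m ih =>
    intro n pos q h
    rw [show m + 1 + n = m + n + 1 by omega]
    cases hno : nextOnRight pos.1 pos.2 ws with
    | none => simp only [iterPos, hno] at h; simp at h
    | some nh =>
      simp only [iterPos, hno] at h
      simp only [survives, hno]
      exact ih n _ _ h

theorem cycle_survives {ws : List (Int × Int)} {pairs : PySem.Dict (Int × Int) (Int × Int)}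
    {r : Int × Int} {k : Nat} (hk : 0 < k) (hcyc : iterPos ws pairs r k = some r) :
    ∀ n, survives ws pairs r n = true := by
  intro n
  induction n using Nat.strong_induction_on with
  | _ n ihn =>
    by_cases hn : n ≤ k
    · have hs : survives ws pairs r (n + (k - n)) = true := by
        rw [show n + (k - n) = k by omega]
        exact iterPos_imp_survives k r r hcyc
      exact survives_mono n (k - n) r hs
    · have h1 : survives ws pairs r n = survives ws pairs r (k + (n - k)) := by
        rw [show k + (n - k) = n by omega]
      rw [h1, survives_shift k (n - k) r r hcyc]
      exact ihn (n - k) (by omega)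

theorem survives_succ {ws : List (Int × Int)} {pairs : PySem.Dict (Int × Int) (Int × Int)}
    {pos nh : Int × Int} (h : nextOnRight pos.1 pos.2 ws = some nh) (n : Nat) :
    survives ws pairs pos (n + 1) = survives ws pairs (pairsGet pairs nh) n := by
  simp [survives, h]

theorem iterPos_one {ws : List (Int × Int)} {pairs : PySem.Dict (Int × Int) (Int × Int)}
    {pos nh : Int × Int} (h : nextOnRight pos.1 pos.2 ws = some nh) :
    iterPos ws pairs pos 1 = some (pairsGet pairs nh) := by
  simp [iterPos, h]

theorem hcWalk_true_survives {ws : List (Int × Int)} {pairs : PySem.Dict (Int × Int) (Int × Int)} :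
    ∀ (f : Nat) (pos : Int × Int) (visited : PySem.Set (Int × Int)),
      (∀ v ∈ visited, ∃ m, iterPos ws pairs (pairsGet pairs v) m = some pos) →
      hcWalk ws pairs pos visited f = true →
      ∀ n, survives ws pairs pos n = true := by
  intro f
  induction f with
  | zero => intro pos visited _ h; simp [hcWalk] at h
  | succ f ih =>
    intro pos visited hinv h
    cases hno : nextOnRight pos.1 pos.2 ws with
    | none => simp [hcWalk, hno] at h
    | some nh =>
      by_cases hv : nh ∈ visited
      · obtain ⟨m, hm⟩ := hinv nh hv
        have hcyc : iterPos ws pairs (pairsGet pairs nh) (m + 1) = some (pairsGet pairs nh) := by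
          rw [iterPos_add m 1, hm]
          exact iterPos_one hno
        have hall := cycle_survives (by omega) hcyc
        intro n
        cases n with
        | zero => rfl
        | succ n => rw [survives_succ hno]; exact hall n
      · have h' : hcWalk ws pairs (pairsGet pairs nh) (visited.add nh) f = true := by
          simpa [hcWalk, hno, hv] using h
        have hinv' : ∀ v ∈ visited.add nh,
            ∃ m, iterPos ws pairs (pairsGet pairs v) m = some (pairsGet pairs nh) := by
          intro v hvmem
          rcases (PySem.Set.mem_add visited nh v).1 hvmem with hvv | hvv
          · obtain ⟨m, hm⟩ := hinv v hvv
            exact ⟨m + 1, by rw [iterPos_add m 1, hm]; exact iterPos_one hno⟩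
          · subst hvv; exact ⟨0, rfl⟩
        have hall := ih _ _ hinv' h'
        intro n
        cases n with
        | zero => rfl
        | succ n => rw [survives_succ hno]; exact hall n

theorem hcWalk_false_survives {ws : List (Int × Int)} {pairs : PySem.Dict (Int × Int) (Int × Int)} :
    ∀ (f : Nat) (pos : Int × Int) (visited : PySem.Set (Int × Int)),
      (ws.toFinset \ visited.toFinset).card < f →
      hcWalk ws pairs pos visited f = false →
      survives ws pairs pos ((ws.toFinset \ visited.toFinset).card + 1) = false := by
  intro f
  induction f with
  | zero => intro pos visited hlt _; exact absurd hlt (Nat.not_lt_zero _)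
  | succ f ih =>
    intro pos visited hlt h
    cases hno : nextOnRight pos.1 pos.2 ws with
    | none => simp [survives, hno]
    | some nh =>
      by_cases hv : nh ∈ visited
      · simp [hcWalk, hno, hv] at h
      · have h' : hcWalk ws pairs (pairsGet pairs nh) (visited.add nh) f = false := by
          simpa [hcWalk, hno, hv] using h
        have hnhws : nh ∈ ws := nextOnRight_mem hno
        have hfin : (visited.add nh).toFinset = insert nh visited.toFinset := by
          ext z
          simp only [List.mem_toFinset, PySem.Set.mem_add, Finset.mem_insert]
          tauto
        have hmem : nh ∈ ws.toFinset \ visited.toFinset := by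
          simp [Finset.mem_sdiff, List.mem_toFinset, hnhws, hv]
        have hcard : (ws.toFinset \ (visited.add nh).toFinset).card
            = (ws.toFinset \ visited.toFinset).card - 1 := by
          rw [hfin, Finset.sdiff_insert, Finset.card_erase_of_mem hmem]
        have hpos1 : 0 < (ws.toFinset \ visited.toFinset).card :=
          Finset.card_pos.mpr ⟨nh, hmem⟩
        have hlt' : (ws.toFinset \ (visited.add nh).toFinset).card < f := by omega
        have hres := ih _ _ hlt' h'
        rw [survives_succ hno]
        rw [show (ws.toFinset \ (visited.add nh).toFinset).card + 1
            = (ws.toFinset \ visited.toFinset).card by omega] at hres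
        exact hres

theorem walk_eq {ws : List (Int × Int)} {pairs : PySem.Dict (Int × Int) (Int × Int)}
    (hP : PairsInWs ws pairs) {pos : Int × Int} (hpos : pos ∈ ws) :
    hcWalk ws pairs pos PySem.Set.empty (ws.length + 2) =
      bWalk (buildNxt ws) pairs pos (ws.length + 1) := by
  rw [bWalk_eq_survives hP _ _ hpos]
  have hempty : ((PySem.Set.empty : PySem.Set (Int × Int)).toFinset : Finset (Int × Int)) = ∅ := rfl
  cases hA : hcWalk ws pairs pos PySem.Set.empty (ws.length + 2) with
  | true =>
    have hall := hcWalk_true_survives (ws.length + 2) pos PySem.Set.empty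
      (by intro v hv; simp [PySem.Set.empty] at hv) hA
    exact (hall (ws.length + 1)).symm
  | false =>
    have hCle : (ws.toFinset \ (PySem.Set.empty : PySem.Set (Int × Int)).toFinset).card
        ≤ ws.length := by
      rw [hempty, Finset.sdiff_empty]
      exact List.toFinset_card_le ws
    have hres := hcWalk_false_survives (ws.length + 2) pos PySem.Set.empty (by omega) hA
    cases hS : survives ws pairs pos (ws.length + 1) with
    | false => rfl
    | true =>
      exfalso
      have hmono := survives_mono
        ((ws.toFinset \ (PySem.Set.empty : PySem.Set (Int × Int)).toFinset).card + 1)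
        ((ws.length + 1) -
          ((ws.toFinset \ (PySem.Set.empty : PySem.Set (Int × Int)).toFinset).card + 1))
        pos
        (by
          rw [show (ws.toFinset \ (PySem.Set.empty : PySem.Set (Int × Int)).toFinset).card + 1 +
              ((ws.length + 1) -
                ((ws.toFinset \ (PySem.Set.empty : PySem.Set (Int × Int)).toFinset).card + 1))
              = ws.length + 1 by omega]
          exact hS)
      rw [hmono] at hres
      exact Bool.noConfusion hres

theorem hasCycle_eq {ws : List (Int × Int)} {pairs : PySem.Dict (Int × Int) (Int × Int)}
    (hP : PairsInWs ws pairs) : hasCycle ws pairs = cyclicB ws (buildNxt ws) pairs := by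
  unfold hasCycle cyclicB
  exact PySem.List.any_congr_mem (fun s hs => walk_eq hP hs)

-- two folds over equal-length lists with pointwise-equal bodies are equal
theorem foldl_eq_of_pointwise {α β γ : Type} :
    ∀ (l₁ : List α) (l₂ : List β) (g₁ : γ → α → γ) (g₂ : γ → β → γ) (acc : γ),
      l₁.length = l₂.length →
      (∀ (i : Nat) (h₁ : i < l₁.length) (h₂ : i < l₂.length) (c : γ), g₁ c l₁[i] = g₂ c l₂[i]) →
      l₁.foldl g₁ acc = l₂.foldl g₂ acc := by
  intro l₁
  induction l₁ with
  | nil =>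
    intro l₂ g₁ g₂ acc hlen _
    cases l₂ with
    | nil => rfl
    | cons b t => simp at hlen
  | cons a t ih =>
    intro l₂ g₁ g₂ acc hlen hpt
    cases l₂ with
    | nil => simp at hlen
    | cons b t₂ =>
      simp only [List.foldl_cons]
      have h0 := hpt 0 (by simp) (by simp) acc
      simp only [List.getElem_cons_zero] at h0
      rw [h0]
      exact ih t₂ _ _ _ (by simpa using hlen)
        (fun i h₁ h₂ c => by simpa using hpt (i + 1) (by simpa using h₁) (by simpa using h₂) c)

theorem gen_eq (ws : List (Int × Int)) :
    ∀ (f : Nat) (unpaired : List (Int × Int)) (pairs : PySem.Dict (Int × Int) (Int × Int)),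
      (∀ u ∈ unpaired, u ∈ ws) → PairsInWs ws pairs →
      genPairingsA ws f unpaired pairs = genPairingsB ws (buildNxt ws) f unpaired pairs := by
  intro f
  induction f with
  | zero => intro unpaired pairs _ _; rfl
  | succ f ih =>
    intro unpaired pairs hU hP
    cases unpaired with
    | nil => simp [genPairingsA, genPairingsB, hasCycle_eq hP]
    | cons first rest =>
      simp only [genPairingsA, genPairingsB]
      rw [if_neg (by simp)]
      have hr : PySem.List.pyRange 1 (PySem.List.len (first :: rest)) 1
          = (List.range rest.length).map (fun k : Nat => (1 : Int) + k) := by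
        rw [PySem.List.len_eq, PySem.List.pyRange_one]
        congr 2
        push_cast [List.length_cons]
        omega
      simp only [PySem.List.pyGetD_zero_cons]
      rw [hr]
      apply foldl_eq_of_pointwise
      · simp
      · intro i h₁ h₂ c
        simp only [List.getElem_map, List.getElem_range, List.getElem_zipIdx, Nat.zero_add]
        have hi : i < rest.length := by simpa using h₁
        have hsec : PySem.List.pyGetD (first :: rest) ((1 : Int) + i) (0, 0) = rest[i] := by
          rw [show ((1 : Int) + i) = ((i + 1 : Nat) : Int) by push_cast; ring,
            PySem.List.pyGetD_natCast]
          simp only [List.getD_cons_succ]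
          exact List.getD_eq_getElem rest (0, 0) hi
        have hA1 : PySem.List.slice (first :: rest) (some 1) (some (1 + (i : Int)))
            = rest.take i := by
          rw [PySem.List.slice_toNat _ (by omega) (by omega)]
          rw [show ((1 : Int) + i).toNat = i + 1 by omega]
          simp
        have hA2 : PySem.List.slice (first :: rest) (some (1 + (i : Int) + 1)) none
            = rest.drop (i + 1) := by
          rw [PySem.List.slice_from _ (by omega)]
          rw [show ((1 : Int) + i + 1).toNat = i + 2 by omega]
          simp [List.drop_succ_cons]
        have hB1 : PySem.List.slice rest none (some (i : Int)) = rest.take i := by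
          rw [PySem.List.slice_to _ (by omega)]
          simp
        have hB2 : PySem.List.slice rest (some ((i : Int) + 1)) none = rest.drop (i + 1) := by
          rw [PySem.List.slice_from _ (by omega)]
          rw [show ((i : Int) + 1).toNat = i + 1 by omega]
        rw [hsec, hA1, hA2, hB1, hB2]
        congr 1
        apply ih
        · intro u hu
          rcases List.mem_append.1 hu with hu | hu
          · exact hU u (List.mem_cons_of_mem _ (List.mem_of_mem_take hu))
          · exact hU u (List.mem_cons_of_mem _ (List.mem_of_mem_drop hu))
        · intro k v hkv
          rw [PySem.Dict.get?_insert] at hkv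
          split_ifs at hkv with hk1
          · simp only [Option.some.injEq] at hkv
            subst hkv
            exact hU _ List.mem_cons_self
          · rw [PySem.Dict.get?_insert] at hkv
            split_ifs at hkv with hk2
            · simp only [Option.some.injEq] at hkv
              subst hkv
              exact hU _ (List.mem_cons_of_mem _ (List.getElem_mem hi))
            · exact hP _ _ hkv

theorem solve_eq (ws : List (Int × Int)) : solve ws = solve_alt ws := by
  unfold solve solve_alt
  exact gen_eq ws (ws.length + 1) ws PySem.Dict.empty (fun u hu => hu)
    (fun k v h => by simp [PySem.Dict.get?_empty] at h)

-- ===== VERDICT (by name: the statement is the Claim_ definition above) =====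
theorem solve_spec : Claim_equal_solve := by
  intro ws _
  unfold Spec_solve
  exact solve_eq ws
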